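-- pv_equiv track=rewrite | github.com/JannikNickel/AdventOfCode | 2023/solutions/day07.py | generate_perms
-- ===== SOURCE A (Python) =====
-- from collections.abc import Generator
--
-- def generate_perms(cards: str) -> Generator[str, None, None]:
--     possible = [c for c in cards if c != "J"]
--     for c0 in possible if cards[0] == "J" else [cards[0]]:
--         for c1 in possible if cards[1] == "J" else [cards[1]]:
--             for c2 in possible if cards[2] == "J" else [cards[2]]:
--                 for c3 in possible if cards[3] == "J" else [cards[3]]:
--                     for c4 in possible if cards[4] == "J" else [cards[4]]:
--                         yield f"{c0}{c1}{c2}{c3}{c4}"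
-- ===== SOURCE B (Python) =====
-- def generate_perms(cards: str):
--     possible = [c for c in cards if c != "J"]
--     combos = [[]]
--     for i in range(5):
--         ch = possible if cards[i] == "J" else [cards[i]]
--         combos = [p + [c] for p in combos for c in ch]
--     yield from ("".join(p) for p in combos)
-- ===== Notes on version B (the rewrite author's own statement) =====
-- stated objective: alternative
-- what changed: Replaces five hard-coded nested loops with a single left-fold over the positions that extends a growing list of prefixes (a cartesian-product accumulator), joining each finished prefix at the end.
-- outside the precondition, e.g. on generate_perms('JJJJ'): A returns [], B raises IndexError; on generate_perms('J'): A returns [], B raises IndexError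
import Mathlib
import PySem

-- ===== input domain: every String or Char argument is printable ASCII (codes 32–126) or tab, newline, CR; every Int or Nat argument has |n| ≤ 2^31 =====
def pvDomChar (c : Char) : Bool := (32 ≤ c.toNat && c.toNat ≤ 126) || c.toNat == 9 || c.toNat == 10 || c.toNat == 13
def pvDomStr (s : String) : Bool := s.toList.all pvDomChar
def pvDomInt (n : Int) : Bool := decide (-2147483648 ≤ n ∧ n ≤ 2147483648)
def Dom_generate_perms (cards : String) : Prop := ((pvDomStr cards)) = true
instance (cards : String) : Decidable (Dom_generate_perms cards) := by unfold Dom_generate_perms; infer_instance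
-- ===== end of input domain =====

-- B replaces the five hard-coded nested loops with one left-fold over the positions
-- that extends a list of prefixes (alternative decomposition; same cost).
-- Pre_ excludes strings shorter than 5, where Python A raises IndexError except on
-- all-'J' short strings, where its loops dry up lazily and it accidentally yields nothing.


-- ===== PORT A =====
-- cards[i]: pyGet? = none is Python's IndexError, excluded by Pre_; [] there keeps the port total.
def pvChoiceA (cs possible : List Char) (i : Int) : List Char :=
  match PySem.List.pyGet? cs i with
  | none => []
  | some c => if c = 'J' then possible else [c]

def generate_perms (cards : String) : List String :=
  let cs := cards.toList
  let possible := cs.filter (fun c => c ≠ 'J')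
  (pvChoiceA cs possible 0).flatMap fun c0 =>
    (pvChoiceA cs possible 1).flatMap fun c1 =>
      (pvChoiceA cs possible 2).flatMap fun c2 =>
        (pvChoiceA cs possible 3).flatMap fun c3 =>
          (pvChoiceA cs possible 4).map fun c4 => String.ofList [c0, c1, c2, c3, c4]

-- ===== PORT B =====
def generate_perms_alt (cards : String) : List String :=
  let cs := cards.toList
  let possible := cs.filter (fun c => c ≠ 'J')
  let combos := (PySem.List.pyRange 0 5 1).foldl
    (fun combos i =>
      let ch := match PySem.List.pyGet? cs i with
        | none => []   -- IndexError, outside Pre_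
        | some c => if c = 'J' then possible else [c]
      combos.flatMap (fun p => ch.map (fun c => p ++ [c])))
    [[]]
  combos.map (fun p => String.ofList p)

-- ===== PRECONDITION & SPEC =====
-- Pre_ excludes strings of fewer than 5 characters: Python A raises IndexError there,
-- except on short all-'J' strings where the empty loops make it yield nothing by accident;
-- B raises IndexError on all of them.
def Pre_generate_perms (cards : String) : Prop := 5 ≤ cards.toList.length
instance (cards : String) : Decidable (Pre_generate_perms cards) := by unfold Pre_generate_perms; infer_instance
def pvWitness_generate_perms : String := "JK2JA"

def Spec_generate_perms (cards : String) (out : List String) : Prop := out = generate_perms_alt cards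
instance (cards : String) (out : List String) : Decidable (Spec_generate_perms cards out) := by unfold Spec_generate_perms; infer_instance

-- ===== CLAIM (what is proved, stated in full; the proofs are below) =====
def Claim_equal_generate_perms : Prop := ∀ (cards : String), Dom_generate_perms cards → Pre_generate_perms cards → Spec_generate_perms cards (generate_perms cards)

-- ===== LEMMAS AND PROOFS =====

-- one fold step followed by a flatMap re-associates into nested flatMaps
theorem pv_step {b : Type} (acc : List (List Char)) (ch : List Char)
    (g : List Char -> List b) :
    (acc.flatMap fun p => ch.map fun c => p ++ [c]).flatMap g
      = acc.flatMap fun p => ch.flatMap fun c => g (p ++ [c]) := by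
  simp [List.flatMap_assoc, List.flatMap_map]

theorem pv_step_map {b : Type} (acc : List (List Char)) (ch : List Char)
    (g : List Char -> b) :
    (acc.flatMap fun p => ch.map fun c => p ++ [c]).map g
      = acc.flatMap fun p => ch.map fun c => g (p ++ [c]) := by
  simp [List.map_flatMap, List.map_map, Function.comp_def]

-- the unrolled fold of B equals the nested flatMaps of A, for arbitrary choice lists
theorem pv_core (ch0 ch1 ch2 ch3 ch4 : List Char) :
    (ch0.flatMap fun c0 => ch1.flatMap fun c1 => ch2.flatMap fun c2 =>
      ch3.flatMap fun c3 => ch4.map fun c4 => String.ofList [c0, c1, c2, c3, c4])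
    = (((((([([] : List Char)].flatMap fun p => ch0.map fun c => p ++ [c]).flatMap
          fun p => ch1.map fun c => p ++ [c]).flatMap
          fun p => ch2.map fun c => p ++ [c]).flatMap
          fun p => ch3.map fun c => p ++ [c]).flatMap
          fun p => ch4.map fun c => p ++ [c]).map fun p => String.ofList p) := by
  rw [pv_step_map, pv_step, pv_step, pv_step, pv_step]
  simp

-- ===== VERDICT (by name: the statement is the Claim_ definition above) =====
theorem generate_perms_spec : Claim_equal_generate_perms := by
  intro cards _ _
  unfold Spec_generate_perms generate_perms generate_perms_alt pvChoiceA
  have hr : PySem.List.pyRange 0 5 1 = [0, 1, 2, 3, 4] := by decide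
  rw [hr]
  simp only [List.foldl_cons, List.foldl_nil]
  exact pv_core _ _ _ _ _
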